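-- pv_equiv track=rewrite | github.com/River-Mt/Algorithm | 프로그래머스/lv1/1845. 폰켓몬/폰켓몬.py | solution
-- ===== SOURCE A (Python) =====
-- def solution(nums):
--     answer = 0
--     dict = {}
--     n = len(nums)
--     for num in nums:
--         dict[num] = dict.get(num, 0) + 1
--
--     if n//2 >= len(dict):
--         answer = len(dict)
--     else:
--         answer = n//2
--
--     return answer
-- ===== SOURCE B (Python) =====
-- def solution(nums):
--     s = sorted(nums)
--     distinct = 1 if s else 0
--     for a, b in zip(s, s[1:]):
--         if a != b:
--             distinct += 1
--     return min(len(nums) // 2, distinct)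
-- ===== Notes on version B (the rewrite author's own statement) =====
-- stated objective: alternative
-- what changed: B replaces A's dict-based frequency tally (whose key count gives the distinct count) with sorting a copy of nums and one linear scan counting positions where the value changes, returning min(len(nums)//2, distinct) directly instead of A's if/else.
import Mathlib
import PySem

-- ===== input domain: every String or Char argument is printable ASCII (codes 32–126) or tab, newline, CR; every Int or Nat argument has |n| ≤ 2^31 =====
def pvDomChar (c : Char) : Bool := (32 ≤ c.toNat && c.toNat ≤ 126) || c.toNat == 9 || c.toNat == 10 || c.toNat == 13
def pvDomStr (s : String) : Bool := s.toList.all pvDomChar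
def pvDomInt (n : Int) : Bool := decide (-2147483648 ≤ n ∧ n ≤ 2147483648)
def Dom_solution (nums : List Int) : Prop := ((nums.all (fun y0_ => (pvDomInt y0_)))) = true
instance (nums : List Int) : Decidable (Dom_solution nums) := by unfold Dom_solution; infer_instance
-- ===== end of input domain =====

-- B replaces A's dict tally with sort + one linear scan counting value changes (alternative decomposition, same result).

-- ===== PORT A =====
def solution (nums : List Int) : Int :=
  -- answer = 0; dict = {}; for num in nums: dict[num] = dict.get(num, 0) + 1
  let d := nums.foldl (fun d num => d.insert num (d.getD num 0 + 1)) (PySem.Dict.empty : PySem.Dict Int Int)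
  let n : Int := nums.length
  if PySem.Int.floordiv n 2 ≥ (d.size : Int) then (d.size : Int) else PySem.Int.floordiv n 2

-- ===== PORT B =====
def solution_alt (nums : List Int) : Int :=
  let s := PySem.List.sorted nums (fun x => x) false
  -- distinct = 1 if s else 0; for a, b in zip(s, s[1:]): if a != b: distinct += 1
  let distinct : Int :=
    (s.zip (s.drop 1)).foldl (fun d p => if p.1 ≠ p.2 then d + 1 else d)
      (if s.isEmpty then 0 else 1)
  min (PySem.Int.floordiv (nums.length : Int) 2) distinct

-- ===== PRECONDITION & SPEC =====
def Spec_solution (nums : List Int) (out : Int) : Prop := out = solution_alt nums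
instance (nums : List Int) (out : Int) : Decidable (Spec_solution nums out) := by unfold Spec_solution; infer_instance

-- ===== CLAIM (what is proved, stated in full; the proofs are below) =====
def Claim_equal_solution : Prop := ∀ (nums : List Int), Dom_solution nums → Spec_solution nums (solution nums)

-- ===== LEMMAS AND PROOFS =====

-- A's dict has one key per distinct value of nums.
lemma dict_size_eq_card (nums : List Int) :
    (nums.foldl (fun d num => d.insert num (d.getD num 0 + 1)) (PySem.Dict.empty : PySem.Dict Int Int)).size
      = nums.toFinset.card := by
  have hk := PySem.Dict.keys_foldl_insert (ν := Int) nums (fun d x => d.getD x 0 + 1) PySem.Dict.empty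
  have hsz : (nums.foldl (fun d num => d.insert num (d.getD num 0 + 1)) (PySem.Dict.empty : PySem.Dict Int Int)).size
      = (nums.foldl (fun d num => d.insert num (d.getD num 0 + 1)) (PySem.Dict.empty : PySem.Dict Int Int)).keys.length := by
    simp [PySem.Dict.size, PySem.Dict.keys]
  rw [hsz, hk]
  have hupd : PySem.Set.update (PySem.Dict.empty : PySem.Dict Int Int).keys nums = PySem.Set.ofList nums := by
    simpa [PySem.Dict.keys, PySem.Dict.empty] using PySem.Set.update_nil_left (α := Int) nums
  rw [hupd]
  have hnd := PySem.Set.nodup_ofList (α := Int) nums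
  have hfs : (PySem.Set.ofList nums).toFinset = nums.toFinset := by
    apply Finset.ext; intro a
    simp [List.mem_toFinset, PySem.Set.mem_ofList]
  calc (PySem.Set.ofList nums).length = (PySem.Set.ofList nums).toFinset.card :=
        (List.toFinset_card_of_nodup hnd).symm
    _ = nums.toFinset.card := by rw [hfs]

-- B's boundary count on a weakly increasing list equals the number of distinct values.
lemma scan_eq_card : ∀ (t : List Int) (x : Int), (x :: t).Pairwise (· ≤ ·) →
    ((x :: t).zip t).foldl (fun d p => if p.1 ≠ p.2 then d + 1 else d) (1 : Int)
      = ((x :: t).toFinset.card : Int) := by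
  intro t
  induction t with
  | nil => intro x _; simp
  | cons y u ih =>
    intro x hp
    have hxy : x ≤ y := (List.pairwise_cons.mp hp).1 y (by simp)
    have hyu := (List.pairwise_cons.mp hp).2
    by_cases hxe : x = y
    · subst hxe
      have hmem : x ∈ x :: u := by simp
      have : ((x :: x :: u).toFinset : Finset Int) = (x :: u).toFinset := by
        simp [List.toFinset_cons]
      rw [this]
      have := ih x hyu
      simpa using this
    · have hlt : x < y := lt_of_le_of_ne hxy hxe
      have hxnot : x ∉ y :: u := by
        intro hx
        rcases List.mem_cons.mp hx with h | h
        · exact hxe h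
        · have hyx : y ≤ x := (List.pairwise_cons.mp hyu).1 x h
          exact absurd (le_antisymm hxy hyx) hxe
      have hcard : ((x :: y :: u).toFinset : Finset Int).card = (y :: u).toFinset.card + 1 := by
        rw [List.toFinset_cons, Finset.card_insert_of_notMem (by simpa using hxnot)]
      have hstep : ((x :: y :: u).zip (y :: u)).foldl (fun d p => if p.1 ≠ p.2 then d + 1 else d) (1 : Int)
          = ((y :: u).zip u).foldl (fun d p => if p.1 ≠ p.2 then d + 1 else d) (2 : Int) := by
        simp [List.zip, hxe]
      have hshift : ∀ (l : List (Int × Int)) (a : Int),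
          l.foldl (fun d p => if p.1 ≠ p.2 then d + 1 else d) (a + 1)
            = l.foldl (fun d p => if p.1 ≠ p.2 then d + 1 else d) a + 1 := by
        intro l
        induction l with
        | nil => intro a; simp
        | cons p l ihl =>
          intro a
          simp only [List.foldl_cons]
          split_ifs with h
          · exact ihl (a + 1)
          · exact ihl a
      have h2 : ((y :: u).zip u).foldl (fun d p => if p.1 ≠ p.2 then d + 1 else d) (2 : Int)
          = ((y :: u).zip u).foldl (fun d p => if p.1 ≠ p.2 then d + 1 else d) (1 : Int) + 1 := by
        have := hshift ((y :: u).zip u) 1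
        norm_num at this ⊢
        exact this
      rw [hstep, h2, ih y hyu, hcard]
      push_cast
      ring

-- B's scan on the whole sorted list, empty case included.
lemma scan_eq_card' (s : List Int) (hpw : s.Pairwise (· ≤ ·)) :
    (s.zip (s.drop 1)).foldl (fun d p => if p.1 ≠ p.2 then d + 1 else d)
      (if s.isEmpty then (0 : Int) else 1) = (s.toFinset.card : Int) := by
  cases s with
  | nil => simp
  | cons x t => simpa using scan_eq_card t x hpw

-- ===== VERDICT (by name: the statement is the Claim_ definition above) =====
theorem solution_spec : Claim_equal_solution := by
  intro nums _
  unfold Spec_solution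
  simp only [solution, solution_alt]
  have hpw : (PySem.List.sorted nums (fun x => x) false).Pairwise (· ≤ ·) := by
    simpa using PySem.List.sorted_pairwise (κ := Int) nums (fun x => x)
  have hperm : (PySem.List.sorted nums (fun x => x) false).Perm nums :=
    PySem.List.sorted_perm nums (fun x => x) false
  have hfs : (PySem.List.sorted nums (fun x => x) false).toFinset = nums.toFinset :=
    List.toFinset_eq_of_perm _ _ hperm
  rw [scan_eq_card' _ hpw, hfs, dict_size_eq_card nums]
  generalize PySem.Int.floordiv (nums.length : Int) 2 = m
  omega
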